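-- pv_equiv track=rewrite | github.com/FabricioMenegolo/Compasso | Udemy/Sprint_3/Python/0_Exercicios.py | uma_para_tres
-- ===== SOURCE A (Python) =====
-- def uma_para_tres(lista0):
--     lista1 = []
--     lista2 = []
--     lista3 = []
--     for i, j in enumerate(lista0):
--         if i < len(lista0)//3:
--             lista1.append(j)
--         elif i < 2 * (len(lista0)//3):
--             lista2.append(j)
--         else:
--             lista3.append(j)
--     return f'{lista1} {lista2} {lista3}'
-- ===== SOURCE B (Python) =====
-- def uma_para_tres(lista0):
--     k = len(lista0) // 3
--     return f'{lista0[:k]} {lista0[k:2*k]} {lista0[2*k:]}'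
-- ===== Notes on version B (the rewrite author's own statement) =====
-- stated objective: simpler
-- what changed: Replaces the element-by-element enumerate loop with two index comparisons per element by computing k = len//3 once and slicing the list into its three parts directly.
import Mathlib
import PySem

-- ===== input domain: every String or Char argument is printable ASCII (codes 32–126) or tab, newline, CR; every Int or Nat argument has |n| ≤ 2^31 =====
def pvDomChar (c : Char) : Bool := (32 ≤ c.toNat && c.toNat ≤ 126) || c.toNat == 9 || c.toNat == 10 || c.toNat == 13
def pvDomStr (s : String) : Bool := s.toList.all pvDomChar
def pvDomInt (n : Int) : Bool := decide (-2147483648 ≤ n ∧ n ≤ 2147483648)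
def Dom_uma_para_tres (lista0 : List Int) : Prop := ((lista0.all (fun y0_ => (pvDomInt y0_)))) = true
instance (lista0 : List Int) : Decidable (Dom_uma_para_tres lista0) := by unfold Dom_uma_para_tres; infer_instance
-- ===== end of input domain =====

-- B replaces A's index-classifying enumerate loop with one k = len//3 computation and three slices (simpler decomposition, same cost).

-- Python's f'{lst}' rendering of a list of ints: '[a, b, c]'
def pyReprIntList (xs : List Int) : String :=
  "[" ++ String.intercalate ", " (xs.map PySem.Int.toStr) ++ "]"

-- ===== PORT A =====
def uma_para_tres (lista0 : List Int) : String :=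
  let r := (PySem.List.enumerate lista0).foldl
    (fun (acc : List Int × List Int × List Int) ij =>
      if ij.1 < PySem.Int.floordiv (lista0.length : Int) 3 then
        (acc.1 ++ [ij.2], acc.2.1, acc.2.2)
      else if ij.1 < 2 * PySem.Int.floordiv (lista0.length : Int) 3 then
        (acc.1, acc.2.1 ++ [ij.2], acc.2.2)
      else
        (acc.1, acc.2.1, acc.2.2 ++ [ij.2]))
    ([], [], [])
  pyReprIntList r.1 ++ " " ++ pyReprIntList r.2.1 ++ " " ++ pyReprIntList r.2.2

-- ===== PORT B =====
def uma_para_tres_alt (lista0 : List Int) : String :=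
  let k : Int := PySem.Int.floordiv (lista0.length : Int) 3
  pyReprIntList (PySem.List.slice lista0 none (some k)) ++ " " ++
  pyReprIntList (PySem.List.slice lista0 (some k) (some (2 * k))) ++ " " ++
  pyReprIntList (PySem.List.slice lista0 (some (2 * k)) none)

-- ===== PRECONDITION & SPEC =====
def Spec_uma_para_tres (lista0 : List Int) (out : String) : Prop := out = uma_para_tres_alt lista0
instance (lista0 : List Int) (out : String) : Decidable (Spec_uma_para_tres lista0 out) := by unfold Spec_uma_para_tres; infer_instance

-- ===== CLAIM (what is proved, stated in full; the proofs are below) =====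
def Claim_equal_uma_para_tres : Prop := ∀ (lista0 : List Int), Dom_uma_para_tres lista0 → Spec_uma_para_tres lista0 (uma_para_tres lista0)

-- ===== LEMMAS AND PROOFS =====

-- A's fold over `enumerate xs s` appends each element to one of the three buckets
-- according to its index; this characterises the result by take/drop of xs.
theorem fold_split (t1 t2 : Int) (h12 : t1 ≤ t2) :
    ∀ (xs : List Int) (s : Int) (a b c : List Int),
    (PySem.List.enumerate xs s).foldl
      (fun (acc : List Int × List Int × List Int) ij =>
        if ij.1 < t1 then (acc.1 ++ [ij.2], acc.2.1, acc.2.2)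
        else if ij.1 < t2 then (acc.1, acc.2.1 ++ [ij.2], acc.2.2)
        else (acc.1, acc.2.1, acc.2.2 ++ [ij.2]))
      (a, b, c)
    = (a ++ xs.take (t1 - s).toNat,
       b ++ (xs.take (t2 - s).toNat).drop (t1 - s).toNat,
       c ++ xs.drop (t2 - s).toNat) := by
  intro xs
  induction xs with
  | nil => intro s a b c; simp [PySem.List.enumerate_nil]
  | cons x xs ih =>
    intro s a b c
    rw [PySem.List.enumerate_cons]
    simp only [List.foldl_cons]
    by_cases h1 : s < t1
    · have ht1 : (t1 - s).toNat = (t1 - (s + 1)).toNat + 1 := by omega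
      have ht2 : (t2 - s).toNat = (t2 - (s + 1)).toNat + 1 := by omega
      simp only [h1, if_pos]
      rw [ih (s + 1)]
      simp [ht1, ht2, List.take_succ_cons, List.drop_succ_cons]
    · by_cases h2 : s < t2
      · have ht1 : (t1 - s).toNat = 0 := by omega
        have ht1' : (t1 - (s + 1)).toNat = 0 := by omega
        have ht2 : (t2 - s).toNat = (t2 - (s + 1)).toNat + 1 := by omega
        simp only [h1, h2, if_neg, if_pos, not_false_iff]
        rw [ih (s + 1)]
        simp [ht1, ht1', ht2]
      · have ht1 : (t1 - s).toNat = 0 := by omega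
        have ht1' : (t1 - (s + 1)).toNat = 0 := by omega
        have ht2 : (t2 - s).toNat = 0 := by omega
        have ht2' : (t2 - (s + 1)).toNat = 0 := by omega
        simp only [h1, h2, if_neg, not_false_iff]
        rw [ih (s + 1)]
        simp [ht1, ht1', ht2, ht2']

-- ===== VERDICT (by name: the statement is the Claim_ definition above) =====
theorem uma_para_tres_spec : Claim_equal_uma_para_tres := by
  intro lista0 _
  unfold Spec_uma_para_tres uma_para_tres uma_para_tres_alt
  set t : Int := PySem.Int.floordiv (lista0.length : Int) 3 with ht
  have h0 : 0 ≤ t := by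
    rw [ht, PySem.Int.floordiv_eq_ediv_of_pos (by omega)]
    exact Int.ediv_nonneg (by positivity) (by omega)
  rw [fold_split t (2 * t) (by omega) lista0 0]
  have e1 : PySem.List.slice lista0 none (some t) = List.take t.toNat lista0 :=
    PySem.List.slice_to lista0 h0
  have e2 : PySem.List.slice lista0 (some t) (some (2 * t))
      = List.take ((2 * t).toNat - t.toNat) (List.drop t.toNat lista0) :=
    PySem.List.slice_toNat lista0 h0 (by omega)
  have e3 : PySem.List.slice lista0 (some (2 * t)) none = List.drop (2 * t).toNat lista0 :=
    PySem.List.slice_from lista0 (by omega)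
  have h2t : (2 * t).toNat = t.toNat + t.toNat := by omega
  simp [e1, e2, e3, h2t, List.drop_take]
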